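-- pv_equiv track=rewrite | github.com/anchapin/ModPorter-AI | ai-engine/benchmarking/indexing_benchmark.py | _generate_test_document
-- ===== SOURCE A (Python) =====
-- def _generate_test_document(word_count: int) -> str:
--     """Generate a test document with specified word count."""
--     # Sample paragraphs with realistic structure
--     paragraphs = [
--         "Minecraft modding is an exciting way to customize your gameplay experience. "
--         "By creating mods, you can add new blocks, items, mobs, and even entire dimensions to the game. "
--         "The process begins with setting up a development environment using tools like Forge or Fabric.",
--
--         "Java programming is the foundation of Minecraft modding. "
--         "Understanding object-oriented programming concepts such as classes, inheritance, and polymorphism "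
--         "is essential for creating complex mods. Many modders start with simple block additions before "
--         "moving on to more advanced features like custom entities and AI.",
--
--         "```java\npublic class CustomBlock extends Block {\n    public CustomBlock() {\n        super(Properties.create(Material.ROCK));\n    }\n}\n```",
--
--         "When developing mods, it's important to consider performance optimization. "
--         "Efficient code ensures that your mod doesn't cause lag or framerate issues for players. "
--         "Common optimization techniques include caching, lazy loading, and minimizing unnecessary calculations.",
--
--         "## Advanced Modding Topics\n\n"
--         "Once you've mastered the basics, you can explore advanced topics like:\n"
--         "- Custom rendering and shaders\n"
--         "- Network packets and multiplayer support\n"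
--         "- Custom data serializers\n"
--         "- Dimension and biome creation",
--
--         "Testing your mods thoroughly is crucial before release. "
--         "Use JUnit for unit testing and consider integration testing with actual Minecraft instances. "
--         "Many modders also find it helpful to get feedback from the community through beta testing programs.",
--     ]
--
--     # Generate document by repeating paragraphs
--     document = ""
--     words_added = 0
--     para_index = 0
--
--     while words_added < word_count:
--         para = paragraphs[para_index % len(paragraphs)]
--         document += para + "\n\n"
--         words_added += len(para.split())
--         para_index += 1
--
--     return document
-- ===== SOURCE B (Python) =====
-- def _generate_test_document(word_count: int) -> str:
--     """Generate a test document with specified word count."""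
--     paragraphs = [
--         "Minecraft modding is an exciting way to customize your gameplay experience. "
--         "By creating mods, you can add new blocks, items, mobs, and even entire dimensions to the game. "
--         "The process begins with setting up a development environment using tools like Forge or Fabric.",
--
--         "Java programming is the foundation of Minecraft modding. "
--         "Understanding object-oriented programming concepts such as classes, inheritance, and polymorphism "
--         "is essential for creating complex mods. Many modders start with simple block additions before "
--         "moving on to more advanced features like custom entities and AI.",
--
--         "```java\npublic class CustomBlock extends Block {\n    public CustomBlock() {\n        super(Properties.create(Material.ROCK));\n    }\n}\n```",
--
--         "When developing mods, it's important to consider performance optimization. "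
--         "Efficient code ensures that your mod doesn't cause lag or framerate issues for players. "
--         "Common optimization techniques include caching, lazy loading, and minimizing unnecessary calculations.",
--
--         "## Advanced Modding Topics\n\n"
--         "Once you've mastered the basics, you can explore advanced topics like:\n"
--         "- Custom rendering and shaders\n"
--         "- Network packets and multiplayer support\n"
--         "- Custom data serializers\n"
--         "- Dimension and biome creation",
--
--         "Testing your mods thoroughly is crucial before release. "
--         "Use JUnit for unit testing and consider integration testing with actual Minecraft instances. "
--         "Many modders also find it helpful to get feedback from the community through beta testing programs.",
--     ]
--
--     if word_count <= 0:
--         return ""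
--
--     # Word count of each paragraph, computed once, and words per full cycle.
--     counts = [len(p.split()) for p in paragraphs]
--     cycle_words = sum(counts)
--     cycle_text = "".join(p + "\n\n" for p in paragraphs)
--
--     # Number of complete cycles strictly before the stopping paragraph.
--     full_cycles = (word_count - 1) // cycle_words
--     parts = [cycle_text] * full_cycles
--     words_added = full_cycles * cycle_words
--
--     # Remainder: at most one more pass over the paragraphs.
--     for para, c in zip(paragraphs, counts):
--         if words_added >= word_count:
--             break
--         parts.append(para + "\n\n")
--         words_added += c
--
--     return "".join(parts)
-- ===== Notes on version B (the rewrite author's own statement) =====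
-- stated objective: faster
-- what changed: Replaces A's one-paragraph-at-a-time while-loop (which re-splits a ~250-char paragraph to count its words on every iteration) with precomputed per-paragraph word counts, a closed-form number of full cycles built by list replication + join, and a single short remainder pass over at most one cycle.
import Mathlib
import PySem

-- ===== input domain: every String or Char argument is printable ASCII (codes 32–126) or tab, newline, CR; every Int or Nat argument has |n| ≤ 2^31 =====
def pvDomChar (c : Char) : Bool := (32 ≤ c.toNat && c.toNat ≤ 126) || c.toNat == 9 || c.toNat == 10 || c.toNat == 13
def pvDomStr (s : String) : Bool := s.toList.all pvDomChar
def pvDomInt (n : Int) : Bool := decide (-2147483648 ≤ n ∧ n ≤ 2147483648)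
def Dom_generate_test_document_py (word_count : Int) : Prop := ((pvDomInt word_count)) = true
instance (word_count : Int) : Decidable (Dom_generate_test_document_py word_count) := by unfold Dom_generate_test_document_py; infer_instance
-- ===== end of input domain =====

-- B replaces A's one-paragraph-at-a-time loop (which re-splits a paragraph on every iteration) by a
-- closed-form bulk of full cycles plus a short remainder pass; measurably faster by a constant factor.

-- ===== PORT A =====
-- The module's six sample paragraphs (shared verbatim by both ports).
def pvP0 : String := "Minecraft modding is an exciting way to customize your gameplay experience. By creating mods, you can add new blocks, items, mobs, and even entire dimensions to the game. The process begins with setting up a development environment using tools like Forge or Fabric."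
def pvP1 : String := "Java programming is the foundation of Minecraft modding. Understanding object-oriented programming concepts such as classes, inheritance, and polymorphism is essential for creating complex mods. Many modders start with simple block additions before moving on to more advanced features like custom entities and AI."
def pvP2 : String := "```java\npublic class CustomBlock extends Block {\n    public CustomBlock() {\n        super(Properties.create(Material.ROCK));\n    }\n}\n```"
def pvP3 : String := "When developing mods, it's important to consider performance optimization. Efficient code ensures that your mod doesn't cause lag or framerate issues for players. Common optimization techniques include caching, lazy loading, and minimizing unnecessary calculations."
def pvP4 : String := "## Advanced Modding Topics\n\nOnce you've mastered the basics, you can explore advanced topics like:\n- Custom rendering and shaders\n- Network packets and multiplayer support\n- Custom data serializers\n- Dimension and biome creation"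
def pvP5 : String := "Testing your mods thoroughly is crucial before release. Use JUnit for unit testing and consider integration testing with actual Minecraft instances. Many modders also find it helpful to get feedback from the community through beta testing programs."

def pvParagraphs : List String := [pvP0, pvP1, pvP2, pvP3, pvP4, pvP5]

-- len(para.split())
def pvCnt (p : String) : Int := ((PySem.Str.split₀ p).length : Int)

-- The six paragraph word counts, evaluated once (cited by the ports' termination and the proofs).
set_option maxRecDepth 40000 in
set_option maxHeartbeats 1000000 in
lemma pvCnt0 : pvCnt pvP0 = 43 := by decide
set_option maxRecDepth 40000 in
set_option maxHeartbeats 1000000 in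
lemma pvCnt1 : pvCnt pvP1 = 43 := by decide
set_option maxRecDepth 40000 in
set_option maxHeartbeats 1000000 in
lemma pvCnt2 : pvCnt pvP2 = 14 := by decide
set_option maxRecDepth 40000 in
set_option maxHeartbeats 1000000 in
lemma pvCnt3 : pvCnt pvP3 = 34 := by decide
set_option maxRecDepth 40000 in
set_option maxHeartbeats 1000000 in
lemma pvCnt4 : pvCnt pvP4 = 35 := by decide
set_option maxRecDepth 40000 in
set_option maxHeartbeats 1000000 in
lemma pvCnt5 : pvCnt pvP5 = 37 := by decide

-- Every paragraph holds at least one word (cited by pvLoopA's decreasing_by).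
lemma pvParaAt (i : Int) :
    1 ≤ pvCnt ((PySem.List.pyGet? pvParagraphs (PySem.Int.mod i (pvParagraphs.length : Int))).getD "") := by
  have hlen : ((pvParagraphs.length : Nat) : Int) = 6 := by rfl
  rw [hlen]
  have h0 : 0 ≤ PySem.Int.mod i 6 := PySem.Int.mod_nonneg i (by norm_num)
  have h6 : PySem.Int.mod i 6 < 6 := PySem.Int.mod_lt i (by norm_num)
  set m := PySem.Int.mod i 6 with hm
  interval_cases m <;>
    simp [pvParagraphs, PySem.List.pyGet?, PySem.List.pyIdx?, pvCnt0, pvCnt1, pvCnt2, pvCnt3, pvCnt4, pvCnt5]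

-- while words_added < word_count: document += para + "\n\n"; words_added += len(para.split()); para_index += 1
-- (the index para_index % len(paragraphs) is always in range, so the `.getD ""` default is never used)
def pvLoopA (word_count : Int) (document : String) (words_added : Int) (para_index : Int) : String :=
  if words_added < word_count then
    pvLoopA word_count
      (document ++ (((PySem.List.pyGet? pvParagraphs (PySem.Int.mod para_index (pvParagraphs.length : Int))).getD "") ++ "\n\n"))
      (words_added + pvCnt ((PySem.List.pyGet? pvParagraphs (PySem.Int.mod para_index (pvParagraphs.length : Int))).getD ""))
      (para_index + 1)
  else document
termination_by (word_count - words_added).toNat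
decreasing_by
  have := pvParaAt para_index
  omega

def generate_test_document_py (word_count : Int) : String := pvLoopA word_count "" 0 0

-- ===== PORT B =====
-- for para, c in zip(paragraphs, counts): if words_added >= word_count: break; parts.append(para + "\n\n"); words_added += c
def pvRemLoop (word_count : Int) (words_added : Int) : List (String × Int) → List String
  | [] => []
  | (para, c) :: rest =>
    if word_count ≤ words_added then []
    else (para ++ "\n\n") :: pvRemLoop word_count (words_added + c) rest

def generate_test_document_py_alt (word_count : Int) : String :=
  if word_count ≤ 0 then "" else
    let counts := pvParagraphs.map pvCnt
    let cycle_words := counts.sum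
    let cycle_text := PySem.Str.join "" (pvParagraphs.map (fun p => p ++ "\n\n"))
    let full_cycles := PySem.Int.floordiv (word_count - 1) cycle_words
    let parts := PySem.List.pyRepeat [cycle_text] full_cycles
    PySem.Str.join "" (parts ++ pvRemLoop word_count (full_cycles * cycle_words) (pvParagraphs.zip counts))

-- ===== PRECONDITION & SPEC =====
def Spec_generate_test_document_py (word_count : Int) (out : String) : Prop := out = generate_test_document_py_alt word_count
instance (word_count : Int) (out : String) : Decidable (Spec_generate_test_document_py word_count out) := by unfold Spec_generate_test_document_py; infer_instance

-- ===== CLAIM (what is proved, stated in full; the proofs are below) =====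
def Claim_equal_generate_test_document_py : Prop := ∀ (word_count : Int), Dom_generate_test_document_py word_count → Spec_generate_test_document_py word_count (generate_test_document_py word_count)

-- ===== LEMMAS AND PROOFS =====
def pvPairs : List (String × Int) := [(pvP0, 43), (pvP1, 43), (pvP2, 14), (pvP3, 34), (pvP4, 35), (pvP5, 37)]
def pvCycleText : String := PySem.Str.join "" (pvParagraphs.map (fun p => p ++ "\n\n"))

lemma pvJoinCons (x : String) (xs : List String) :
    PySem.Str.join "" (x :: xs) = x ++ PySem.Str.join "" xs := by
  cases xs <;> simp [PySem.Str.join, PySem.Chars.join_singleton, PySem.Chars.join_cons_cons]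

lemma pvJoinNil : PySem.Str.join "" ([] : List String) = "" := by
  simp [PySem.Str.join, PySem.Chars.join_nil]

lemma pvJoinAppend (a b : List String) :
    PySem.Str.join "" (a ++ b) = PySem.Str.join "" a ++ PySem.Str.join "" b := by
  induction a with
  | nil => simp [pvJoinNil, String.empty_append]
  | cons x t ih => simp [pvJoinCons, ih, String.append_assoc]

lemma pvLenEq : ((pvParagraphs.length : Nat) : Int) = 6 := by rfl

lemma pvGet0 : (PySem.List.pyGet? pvParagraphs (0 : Int)).getD "" = pvP0 := by rfl
lemma pvGet1 : (PySem.List.pyGet? pvParagraphs (1 : Int)).getD "" = pvP1 := by rfl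
lemma pvGet2 : (PySem.List.pyGet? pvParagraphs (2 : Int)).getD "" = pvP2 := by rfl
lemma pvGet3 : (PySem.List.pyGet? pvParagraphs (3 : Int)).getD "" = pvP3 := by rfl
lemma pvGet4 : (PySem.List.pyGet? pvParagraphs (4 : Int)).getD "" = pvP4 := by rfl
lemma pvGet5 : (PySem.List.pyGet? pvParagraphs (5 : Int)).getD "" = pvP5 := by rfl

lemma pvModSucc (i j : Int) (h : PySem.Int.mod i 6 = j) (hj : j < 5) :
    PySem.Int.mod (i + 1) 6 = j + 1 := by
  rw [PySem.Int.mod_eq_emod_of_pos (by norm_num)] at h ⊢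
  omega

-- A's loop from a state at cycle position 5, when the cycle suffix suffices to finish.
lemma pvR5 (wc : Int) (doc : String) (w i : Int) (hm : PySem.Int.mod i 6 = 5) (hw : wc ≤ w + 37) :
    pvLoopA wc doc w i = doc ++ PySem.Str.join "" (pvRemLoop wc w (pvPairs.drop 5)) := by
  rw [pvLoopA]
  by_cases h : w < wc
  · rw [if_pos h]
    simp only [pvLenEq, hm, pvGet5, pvCnt5]
    rw [pvLoopA, if_neg (by omega)]
    show _ = doc ++ PySem.Str.join "" (pvRemLoop wc w [(pvP5, 37)])
    rw [pvRemLoop, if_neg (by omega), pvRemLoop, pvJoinCons, pvJoinNil,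
      String.append_empty]
  · rw [if_neg h]
    show doc = doc ++ PySem.Str.join "" (pvRemLoop wc w [(pvP5, 37)])
    rw [pvRemLoop, if_pos (by omega), pvJoinNil, String.append_empty]

lemma pvR4 (wc : Int) (doc : String) (w i : Int) (hm : PySem.Int.mod i 6 = 4) (hw : wc ≤ w + 72) :
    pvLoopA wc doc w i = doc ++ PySem.Str.join "" (pvRemLoop wc w (pvPairs.drop 4)) := by
  rw [pvLoopA]
  by_cases h : w < wc
  · rw [if_pos h]
    simp only [pvLenEq, hm, pvGet4, pvCnt4]
    rw [pvR5 wc _ _ _ (pvModSucc i 4 hm (by norm_num)) (by omega)]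
    show _ = doc ++ PySem.Str.join "" (pvRemLoop wc w ((pvP4, 35) :: pvPairs.drop 5))
    rw [pvRemLoop, if_neg (by omega), pvJoinCons, String.append_assoc]
  · rw [if_neg h]
    show doc = doc ++ PySem.Str.join "" (pvRemLoop wc w ((pvP4, 35) :: pvPairs.drop 5))
    rw [pvRemLoop, if_pos (by omega), pvJoinNil, String.append_empty]

lemma pvR3 (wc : Int) (doc : String) (w i : Int) (hm : PySem.Int.mod i 6 = 3) (hw : wc ≤ w + 106) :
    pvLoopA wc doc w i = doc ++ PySem.Str.join "" (pvRemLoop wc w (pvPairs.drop 3)) := by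
  rw [pvLoopA]
  by_cases h : w < wc
  · rw [if_pos h]
    simp only [pvLenEq, hm, pvGet3, pvCnt3]
    rw [pvR4 wc _ _ _ (pvModSucc i 3 hm (by norm_num)) (by omega)]
    show _ = doc ++ PySem.Str.join "" (pvRemLoop wc w ((pvP3, 34) :: pvPairs.drop 4))
    rw [pvRemLoop, if_neg (by omega), pvJoinCons, String.append_assoc]
  · rw [if_neg h]
    show doc = doc ++ PySem.Str.join "" (pvRemLoop wc w ((pvP3, 34) :: pvPairs.drop 4))
    rw [pvRemLoop, if_pos (by omega), pvJoinNil, String.append_empty]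

lemma pvR2 (wc : Int) (doc : String) (w i : Int) (hm : PySem.Int.mod i 6 = 2) (hw : wc ≤ w + 120) :
    pvLoopA wc doc w i = doc ++ PySem.Str.join "" (pvRemLoop wc w (pvPairs.drop 2)) := by
  rw [pvLoopA]
  by_cases h : w < wc
  · rw [if_pos h]
    simp only [pvLenEq, hm, pvGet2, pvCnt2]
    rw [pvR3 wc _ _ _ (pvModSucc i 2 hm (by norm_num)) (by omega)]
    show _ = doc ++ PySem.Str.join "" (pvRemLoop wc w ((pvP2, 14) :: pvPairs.drop 3))
    rw [pvRemLoop, if_neg (by omega), pvJoinCons, String.append_assoc]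
  · rw [if_neg h]
    show doc = doc ++ PySem.Str.join "" (pvRemLoop wc w ((pvP2, 14) :: pvPairs.drop 3))
    rw [pvRemLoop, if_pos (by omega), pvJoinNil, String.append_empty]

lemma pvR1 (wc : Int) (doc : String) (w i : Int) (hm : PySem.Int.mod i 6 = 1) (hw : wc ≤ w + 163) :
    pvLoopA wc doc w i = doc ++ PySem.Str.join "" (pvRemLoop wc w (pvPairs.drop 1)) := by
  rw [pvLoopA]
  by_cases h : w < wc
  · rw [if_pos h]
    simp only [pvLenEq, hm, pvGet1, pvCnt1]
    rw [pvR2 wc _ _ _ (pvModSucc i 1 hm (by norm_num)) (by omega)]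
    show _ = doc ++ PySem.Str.join "" (pvRemLoop wc w ((pvP1, 43) :: pvPairs.drop 2))
    rw [pvRemLoop, if_neg (by omega), pvJoinCons, String.append_assoc]
  · rw [if_neg h]
    show doc = doc ++ PySem.Str.join "" (pvRemLoop wc w ((pvP1, 43) :: pvPairs.drop 2))
    rw [pvRemLoop, if_pos (by omega), pvJoinNil, String.append_empty]

lemma pvR0 (wc : Int) (doc : String) (w i : Int) (hm : PySem.Int.mod i 6 = 0) (hw : wc ≤ w + 206) :
    pvLoopA wc doc w i = doc ++ PySem.Str.join "" (pvRemLoop wc w pvPairs) := by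
  rw [pvLoopA]
  by_cases h : w < wc
  · rw [if_pos h]
    simp only [pvLenEq, hm, pvGet0, pvCnt0]
    rw [pvR1 wc _ _ _ (pvModSucc i 0 hm (by norm_num)) (by omega)]
    show _ = doc ++ PySem.Str.join "" (pvRemLoop wc w ((pvP0, 43) :: pvPairs.drop 1))
    rw [pvRemLoop, if_neg (by omega), pvJoinCons, String.append_assoc]
  · rw [if_neg h]
    show doc = doc ++ PySem.Str.join "" (pvRemLoop wc w ((pvP0, 43) :: pvPairs.drop 1))
    rw [pvRemLoop, if_pos (by omega), pvJoinNil, String.append_empty]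

lemma pvCycleTextEq :
    pvCycleText = (pvP0 ++ "\n\n") ++ ((pvP1 ++ "\n\n") ++ ((pvP2 ++ "\n\n") ++ ((pvP3 ++ "\n\n") ++ ((pvP4 ++ "\n\n") ++ (pvP5 ++ "\n\n"))))) := by
  simp [pvCycleText, pvParagraphs, pvJoinCons, pvJoinNil, String.append_empty]

-- One full cycle of A's loop, when at least a full cycle of words is still needed.
lemma pvCyc (wc : Int) (doc : String) (w i : Int) (hm : PySem.Int.mod i 6 = 0) (hw : w + 206 ≤ wc) :
    pvLoopA wc doc w i = pvLoopA wc (doc ++ pvCycleText) (w + 206) (i + 6) := by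
  have hm1 : PySem.Int.mod (i + 1) 6 = 1 := by simpa using pvModSucc i 0 hm (by norm_num)
  have hm2 : PySem.Int.mod (i + 1 + 1) 6 = 2 := by simpa using pvModSucc (i+1) 1 hm1 (by norm_num)
  have hm3 : PySem.Int.mod (i + 1 + 1 + 1) 6 = 3 := by simpa using pvModSucc (i+1+1) 2 hm2 (by norm_num)
  have hm4 : PySem.Int.mod (i + 1 + 1 + 1 + 1) 6 = 4 := by simpa using pvModSucc (i+1+1+1) 3 hm3 (by norm_num)
  have hm5 : PySem.Int.mod (i + 1 + 1 + 1 + 1 + 1) 6 = 5 := by simpa using pvModSucc (i+1+1+1+1) 4 hm4 (by norm_num)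
  rw [pvLoopA, if_pos (by omega)]; simp only [pvLenEq, hm, pvGet0, pvCnt0]
  rw [pvLoopA, if_pos (by omega)]; simp only [pvLenEq, hm1, pvGet1, pvCnt1]
  rw [pvLoopA, if_pos (by omega)]; simp only [pvLenEq, hm2, pvGet2, pvCnt2]
  rw [pvLoopA, if_pos (by omega)]; simp only [pvLenEq, hm3, pvGet3, pvCnt3]
  rw [pvLoopA, if_pos (by omega)]; simp only [pvLenEq, hm4, pvGet4, pvCnt4]
  rw [pvLoopA, if_pos (by omega)]; simp only [pvLenEq, hm5, pvGet5, pvCnt5]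
  have hi : i + 1 + 1 + 1 + 1 + 1 + 1 = i + 6 := by ring
  have hwsum : w + 43 + 43 + 14 + 34 + 35 + 37 = w + 206 := by ring
  rw [hi, hwsum, pvCycleTextEq]
  simp only [String.append_assoc]

-- n full cycles then the remainder, characterising A's loop from a cycle-aligned state.
lemma pvMain (wc : Int) : ∀ (n : Nat) (doc : String) (w i : Int),
    PySem.Int.mod i 6 = 0 → 206 * (n : Int) < wc - w → wc - w ≤ 206 * ((n : Int) + 1) →
    pvLoopA wc doc w i =
      doc ++ (PySem.Str.join "" (List.replicate n pvCycleText) ++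
        PySem.Str.join "" (pvRemLoop wc (w + 206 * (n : Int)) pvPairs)) := by
  intro n
  induction n with
  | zero =>
    intro doc w i hm hlo hhi
    rw [pvR0 wc doc w i hm (by omega)]
    simp [pvJoinNil, String.empty_append]
  | succ k ih =>
    intro doc w i hm hlo hhi
    rw [pvCyc wc doc w i hm (by push_cast at hlo ⊢; omega)]
    rw [ih (doc ++ pvCycleText) (w + 206) (i + 6)
      (by rw [PySem.Int.mod_eq_emod_of_pos (by norm_num)] at hm ⊢; omega)
      (by push_cast at hlo ⊢; omega) (by push_cast at hhi ⊢; omega)]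
    rw [List.replicate_succ, pvJoinCons]
    have : w + 206 + 206 * (k : Int) = w + 206 * ((k : Int) + 1) := by ring
    rw [this]
    push_cast
    simp only [String.append_assoc]

lemma pvCountsEq : pvParagraphs.map pvCnt = [43, 43, 14, 34, 35, 37] := by
  simp [pvParagraphs, pvCnt0, pvCnt1, pvCnt2, pvCnt3, pvCnt4, pvCnt5]

lemma pvZipEq : pvParagraphs.zip ([43, 43, 14, 34, 35, 37] : List Int) = pvPairs := by rfl

-- ===== VERDICT (by name: the statement is the Claim_ definition above) =====
theorem generate_test_document_py_spec : Claim_equal_generate_test_document_py := by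
  intro wc _
  unfold Spec_generate_test_document_py generate_test_document_py generate_test_document_py_alt
  by_cases hpos : wc ≤ 0
  · rw [if_pos hpos, pvLoopA, if_neg (by omega)]
  · rw [if_neg hpos]
    simp only [pvCountsEq]
    rw [pvZipEq]
    have hsum : ([43, 43, 14, 34, 35, 37] : List Int).sum = 206 := by norm_num
    rw [hsum]
    set fc := PySem.Int.floordiv (wc - 1) 206 with hfc
    have hbr := (PySem.Int.floordiv_eq_iff_of_pos (a := wc - 1) (b := 206) (q := fc) (by norm_num)).mp rfl
    have hfc0 : 0 ≤ fc := by nlinarith [hbr.1, hbr.2]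
    have hfcn : fc = ((fc.toNat : Nat) : Int) := by omega
    rw [pvMain wc fc.toNat "" 0 0 (by decide) (by omega) (by omega)]
    rw [String.empty_append, PySem.List.pyRepeat_singleton, pvJoinAppend]
    have : fc * 206 = 0 + 206 * ((fc.toNat : Nat) : Int) := by omega
    rw [this]
    rfl
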